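-- pv_equiv track=rewrite | github.com/jschneid/advent-of-code-2023 | day-21/day-21-part-1.py | next_garden_state
-- ===== SOURCE A (Python) =====
-- def next_garden_state(garden):
--     next_garden = []
--     for y in range(len(garden)):
--         next_row = ''
--         for x in range(len(garden[y])):
--             next_row += next_plot_state(garden, y, x)
--         next_garden.append(next_row)
--     return next_garden
--
-- def next_plot_state(garden, y, x):
--     plot = garden[y][x]
--     if plot == '#':
--         return '#'
--
--     if y > 0 and garden[y - 1][x] == 'S':
--         return 'S'
--     if y < len(garden) - 1 and garden[y + 1][x] == 'S':
--         return 'S'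
--     if x > 0 and garden[y][x - 1] == 'S':
--         return 'S'
--     if x < len(garden[y]) - 1 and garden[y][x + 1] == 'S':
--         return 'S'
--
--     return '.'
-- ===== SOURCE B (Python) =====
-- def next_garden_state(garden):
--     base = [['#' if c == '#' else '.' for c in row] for row in garden]
--     frontier = [(y, x) for y, row in enumerate(garden)
--                 for x, c in enumerate(row) if c == 'S']
--     for y, x in frontier:
--         for ny, nx in ((y - 1, x), (y + 1, x), (y, x - 1), (y, x + 1)):
--             if 0 <= ny < len(base) and 0 <= nx < len(base[ny]) and base[ny][nx] != '#':
--                 base[ny][nx] = 'S'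
--     return [''.join(row) for row in base]
-- ===== Notes on version B (the rewrite author's own statement) =====
-- stated objective: alternative
-- what changed: A pulls per cell (every cell scans its four neighbours for 'S'); B collects the 'S' coordinates once and pushes 'S' onto each in-bounds non-'#' neighbour of a pre-built base grid, joining rows at the end.
import Mathlib
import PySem

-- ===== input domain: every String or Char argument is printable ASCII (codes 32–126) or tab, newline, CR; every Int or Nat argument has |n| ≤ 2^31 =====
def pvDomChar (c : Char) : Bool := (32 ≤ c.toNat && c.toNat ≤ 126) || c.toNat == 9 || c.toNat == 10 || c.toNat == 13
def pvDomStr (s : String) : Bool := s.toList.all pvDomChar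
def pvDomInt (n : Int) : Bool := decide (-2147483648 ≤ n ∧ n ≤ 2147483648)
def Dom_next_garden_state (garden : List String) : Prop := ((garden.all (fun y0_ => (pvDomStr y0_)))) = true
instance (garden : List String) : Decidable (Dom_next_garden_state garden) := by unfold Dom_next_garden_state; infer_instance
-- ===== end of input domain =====

-- B replaces A's per-cell pull (each cell scans its four neighbours for 'S') by a push from the
-- frontier: collect the 'S' coordinates once, then stamp 'S' onto their non-'#' in-bounds neighbours
-- in a pre-built base grid (objective: alternative decomposition; same input/output behaviour).
-- Strings are built as List Char and wrapped with String.ofList (exact: Python str concatenation).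

-- ===== PORT A =====
def next_plot_state (garden : List String) (y x : Int) : Char :=
  let plot := PySem.List.pyGetD (PySem.List.pyGetD garden y "").toList x ' '
  if plot = '#' then '#'
  else if 0 < y ∧ PySem.List.pyGetD (PySem.List.pyGetD garden (y - 1) "").toList x ' ' = 'S' then 'S'
  else if y < PySem.List.len garden - 1 ∧
      PySem.List.pyGetD (PySem.List.pyGetD garden (y + 1) "").toList x ' ' = 'S' then 'S'
  else if 0 < x ∧ PySem.List.pyGetD (PySem.List.pyGetD garden y "").toList (x - 1) ' ' = 'S' then 'S'
  else if x < PySem.List.len (PySem.List.pyGetD garden y "").toList - 1 ∧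
      PySem.List.pyGetD (PySem.List.pyGetD garden y "").toList (x + 1) ' ' = 'S' then 'S'
  else '.'

def next_garden_state (garden : List String) : List String :=
  (PySem.List.pyRange 0 (PySem.List.len garden)).foldl
    (fun next_garden y =>
      next_garden ++ [String.ofList
        ((PySem.List.pyRange 0 (PySem.List.len (PySem.List.pyGetD garden y "").toList)).foldl
          (fun next_row x => next_row ++ [next_plot_state garden y x]) [])])
    []

-- ===== PORT B =====
def bBase (garden : List String) : List (List Char) :=
  garden.map (fun row => row.toList.map (fun c => if c = '#' then '#' else '.'))

def bFrontier (garden : List String) : List (Int × Int) :=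
  (PySem.List.enumerate garden).flatMap (fun p =>
    (PySem.List.enumerate p.2.toList).filterMap (fun q =>
      if q.2 = 'S' then some (p.1, q.1) else none))

def bPush (g : List (List Char)) (ny nx : Int) : List (List Char) :=
  if 0 ≤ ny ∧ ny < PySem.List.len g ∧ 0 ≤ nx ∧ nx < PySem.List.len (PySem.List.pyGetD g ny []) ∧
      PySem.List.pyGetD (PySem.List.pyGetD g ny []) nx ' ' ≠ '#' then
    PySem.List.pySetD g ny (PySem.List.pySetD (PySem.List.pyGetD g ny []) nx 'S')
  else g

def bStep (g : List (List Char)) (p : Int × Int) : List (List Char) :=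
  [(p.1 - 1, p.2), (p.1 + 1, p.2), (p.1, p.2 - 1), (p.1, p.2 + 1)].foldl
    (fun g q => bPush g q.1 q.2) g

def next_garden_state_alt (garden : List String) : List String :=
  ((bFrontier garden).foldl bStep (bBase garden)).map String.ofList

-- ===== PRECONDITION & SPEC =====
-- Pre_ excludes exactly the inputs on which Python A raises IndexError: a non-'#' cell whose
-- column does not exist in the adjacent row its neighbour check reads (jagged rows).
def Pre_next_garden_state (garden : List String) : Prop :=
  ∀ y ∈ List.range garden.length, ∀ x ∈ List.range (garden.getD y "").toList.length,
    (garden.getD y "").toList.getD x ' ' ≠ '#' →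
      (0 < y → x < (garden.getD (y - 1) "").toList.length) ∧
      (¬ (0 < y ∧ (garden.getD (y - 1) "").toList.getD x ' ' = 'S') →
        y + 1 < garden.length → x < (garden.getD (y + 1) "").toList.length)
instance (garden : List String) : Decidable (Pre_next_garden_state garden) := by
  unfold Pre_next_garden_state; infer_instance

def pvWitness_next_garden_state : List String := ["S.", ".#"]

def Spec_next_garden_state (garden : List String) (out : List String) : Prop :=
  out = next_garden_state_alt garden
instance (garden : List String) (out : List String) : Decidable (Spec_next_garden_state garden out) := by
  unfold Spec_next_garden_state; infer_instance

-- ===== CLAIM (what is proved, stated in full; the proofs are below) =====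
def Claim_equal_next_garden_state : Prop := ∀ (garden : List String), Dom_next_garden_state garden → Pre_next_garden_state garden → Spec_next_garden_state garden (next_garden_state garden)

-- ===== LEMMAS AND PROOFS =====

def celS (garden : List String) (y x : Nat) : Char := ((garden.getD y "").toList).getD x ' '

def celG (g : List (List Char)) (y x : Nat) : Char := (g.getD y []).getD x ' '

def specC (garden : List String) (y x : Nat) : Char :=
  if celS garden y x = '#' then '#'
  else if (0 < y ∧ celS garden (y - 1) x = 'S') ∨ celS garden (y + 1) x = 'S' ∨
      (0 < x ∧ celS garden y (x - 1) = 'S') ∨ celS garden y (x + 1) = 'S' then 'S'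
  else '.'

theorem bounds_of_celS {garden : List String} {y x : Nat} {c : Char} (hc : c ≠ ' ')
    (h : celS garden y x = c) : y < garden.length ∧ x < (garden.getD y "").toList.length := by
  unfold celS at h
  by_cases hy : y < garden.length
  · refine ⟨hy, ?_⟩
    by_cases hx : x < (garden.getD y "").toList.length
    · exact hx
    · rw [List.getD_eq_getElem?_getD, List.getElem?_eq_none (by omega)] at h
      simp at h; exact absurd h.symm hc
  · exfalso
    rw [show garden.getD y "" = "" from List.getD_eq_default _ _ (by omega)] at h
    simp at h; exact hc h.symm

theorem if_chain (a c1 c2 c3 c4 : Prop) [Decidable a] [Decidable c1] [Decidable c2]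
    [Decidable c3] [Decidable c4] (r s d : Char) :
    (if a then r else if c1 then s else if c2 then s else if c3 then s else if c4 then s else d)
      = (if a then r else if c1 ∨ c2 ∨ c3 ∨ c4 then s else d) := by
  by_cases a <;> by_cases c1 <;> by_cases c2 <;> by_cases c3 <;> by_cases c4 <;> simp [*]

theorem next_plot_state_eq_specC (garden : List String) (y x : Nat) :
    next_plot_state garden (y : Int) (x : Int) = specC garden y x := by
  have hS : ('S' : Char) ≠ ' ' := by decide
  have bD := fun h => (bounds_of_celS (garden := garden) (y := y+1) (x := x) hS h).1
  have bR := fun h => (bounds_of_celS (garden := garden) (y := y) (x := x+1) hS h).2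
  simp only [next_plot_state, specC, celS, PySem.List.pyGetD_natCast, PySem.List.len_eq] at *
  rw [show ((y:Int) + 1) = ((y+1 : Nat) : Int) by omega,
      show ((x:Int) + 1) = ((x+1 : Nat) : Int) by omega]
  simp only [PySem.List.pyGetD_natCast]
  rw [if_chain]
  by_cases hy0 : 0 < y
  · by_cases hx0 : 0 < x
    · rw [show ((y:Int) - 1) = ((y-1 : Nat) : Int) by omega,
          show ((x:Int) - 1) = ((x-1 : Nat) : Int) by omega]
      simp only [PySem.List.pyGetD_natCast]
      congr 1
      refine if_congr ?_ rfl rfl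
      constructor
      · rintro (⟨_, h⟩ | ⟨_, h⟩ | ⟨_, h⟩ | ⟨_, h⟩)
        · exact Or.inl ⟨hy0, h⟩
        · exact Or.inr (Or.inl h)
        · exact Or.inr (Or.inr (Or.inl ⟨hx0, h⟩))
        · exact Or.inr (Or.inr (Or.inr h))
      · rintro (⟨_, h⟩ | h | ⟨_, h⟩ | h)
        · exact Or.inl ⟨by omega, h⟩
        · exact Or.inr (Or.inl ⟨by have := bD h; omega, h⟩)
        · exact Or.inr (Or.inr (Or.inl ⟨by omega, h⟩))
        · exact Or.inr (Or.inr (Or.inr ⟨by have := bR h; omega, h⟩))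
    · have hx0' : x = 0 := by omega
      subst hx0'
      congr 1
      refine if_congr ?_ rfl rfl
      constructor
      · rintro (⟨_, h⟩ | ⟨_, h⟩ | ⟨h0, _⟩ | ⟨_, h⟩)
        · exact Or.inl ⟨hy0, by rwa [show ((y:Int) - 1) = ((y-1 : Nat) : Int) by omega, PySem.List.pyGetD_natCast] at h⟩
        · exact Or.inr (Or.inl h)
        · omega
        · exact Or.inr (Or.inr (Or.inr h))
      · rintro (⟨_, h⟩ | h | ⟨h0, _⟩ | h)
        · exact Or.inl ⟨by omega, by rwa [show ((y:Int) - 1) = ((y-1 : Nat) : Int) by omega, PySem.List.pyGetD_natCast]⟩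
        · exact Or.inr (Or.inl ⟨by have := bD h; omega, h⟩)
        · omega
        · exact Or.inr (Or.inr (Or.inr ⟨by have := bR h; omega, h⟩))
  · have hy0' : y = 0 := by omega
    subst hy0'
    by_cases hx0 : 0 < x
    · rw [show ((x:Int) - 1) = ((x-1 : Nat) : Int) by omega]
      simp only [PySem.List.pyGetD_natCast]
      congr 1
      refine if_congr ?_ rfl rfl
      constructor
      · rintro (⟨h0, _⟩ | ⟨_, h⟩ | ⟨_, h⟩ | ⟨_, h⟩)
        · omega
        · exact Or.inr (Or.inl h)
        · exact Or.inr (Or.inr (Or.inl ⟨hx0, h⟩))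
        · exact Or.inr (Or.inr (Or.inr h))
      · rintro (⟨h0, _⟩ | h | ⟨_, h⟩ | h)
        · omega
        · exact Or.inr (Or.inl ⟨by have := bD h; omega, h⟩)
        · exact Or.inr (Or.inr (Or.inl ⟨by omega, h⟩))
        · exact Or.inr (Or.inr (Or.inr ⟨by have := bR h; omega, h⟩))
    · have hx0' : x = 0 := by omega
      subst hx0'
      congr 1
      refine if_congr ?_ rfl rfl
      constructor
      · rintro (⟨h0, _⟩ | ⟨_, h⟩ | ⟨h0, _⟩ | ⟨_, h⟩)
        · omega
        · exact Or.inr (Or.inl h)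
        · omega
        · exact Or.inr (Or.inr (Or.inr h))
      · rintro (⟨h0, _⟩ | h | ⟨h0, _⟩ | h)
        · omega
        · exact Or.inr (Or.inl ⟨by have := bD h; omega, h⟩)
        · omega
        · exact Or.inr (Or.inr (Or.inr ⟨by have := bR h; omega, h⟩))

theorem A_eq (garden : List String) :
    next_garden_state garden =
      ((List.range garden.length).map (fun y =>
        (List.range (garden.getD y "").toList.length).map (fun x => specC garden y x))).map
        String.ofList := by
  unfold next_garden_state
  rw [PySem.List.len_eq, PySem.List.pyRange_zero_natCast, List.foldl_map,
      PySem.List.foldl_append_singleton_eq_map, List.map_map, List.nil_append]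
  refine List.map_congr_left fun y _ => ?_
  show String.ofList _ = String.ofList _
  congr 1
  simp only [PySem.List.pyGetD_natCast, PySem.List.len_eq]
  rw [PySem.List.pyRange_zero_natCast, List.foldl_map,
      PySem.List.foldl_append_singleton_eq_map, List.nil_append]
  exact List.map_congr_left fun x _ => next_plot_state_eq_specC garden y x

theorem rowD_eq (g : List (List Char)) {y : Nat} (hy : y < g.length) : g.getD y [] = g[y] := by
  rw [List.getD_eq_getElem?_getD, List.getElem?_eq_getElem hy, Option.getD_some]

theorem colD_eq (r : List Char) {x : Nat} (hx : x < r.length) : r.getD x ' ' = r[x] := by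
  rw [List.getD_eq_getElem?_getD, List.getElem?_eq_getElem hx, Option.getD_some]

theorem strD_eq (garden : List String) {y : Nat} (hy : y < garden.length) :
    garden.getD y "" = garden[y] := by
  rw [List.getD_eq_getElem?_getD, List.getElem?_eq_getElem hy, Option.getD_some]

theorem len_bPush (g : List (List Char)) (ny nx : Int) : (bPush g ny nx).length = g.length := by
  unfold bPush
  split
  · next h =>
    rw [PySem.List.pySetD_of_nonneg _ _ h.1, List.length_set]
  · rfl

theorem getD_bPush (g : List (List Char)) (ny nx : Int) (y : Nat) :
    ((bPush g ny nx).getD y []).length = (g.getD y []).length := by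
  unfold bPush
  split
  · next h =>
    obtain ⟨h1, h2, h3, h4, h5⟩ := h
    rw [PySem.List.len_eq] at h2
    rw [PySem.List.pySetD_of_nonneg _ _ h1, PySem.List.pySetD_of_nonneg _ _ h3,
        PySem.List.pyGetD_eq_getElem _ _ h1 h2]
    rw [List.getD_eq_getElem?_getD, List.getElem?_set, List.getD_eq_getElem?_getD (l := g)]
    by_cases hey : ny.toNat = y
    · rw [if_pos hey, if_pos (by omega), Option.getD_some, List.length_set, ← hey,
          List.getElem?_eq_getElem (by omega), Option.getD_some]
    · rw [if_neg hey]
  · rfl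

theorem celG_bPush (g : List (List Char)) (ny nx : Int) (y x : Nat) :
    celG (bPush g ny nx) y x =
      if ny = (y : Int) ∧ nx = (x : Int) ∧ y < g.length ∧ x < (g.getD y []).length ∧
          celG g y x ≠ '#'
      then 'S' else celG g y x := by
  unfold bPush celG
  split
  · next h =>
    obtain ⟨h1, h2, h3, h4, h5⟩ := h
    rw [PySem.List.len_eq] at h2
    rw [PySem.List.pyGetD_eq_getElem _ _ h1 h2] at h4 h5
    rw [PySem.List.len_eq] at h4
    rw [PySem.List.pyGetD_eq_getElem _ _ h3 (by exact_mod_cast h4)] at h5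
    have hny : ny.toNat < g.length := by omega
    have hnx : nx.toNat < g[ny.toNat].length := by omega
    rw [PySem.List.pySetD_of_nonneg _ _ h1, PySem.List.pySetD_of_nonneg _ _ h3,
        PySem.List.pyGetD_eq_getElem _ _ h1 h2]
    by_cases hey : ny.toNat = y
    · subst hey
      rw [rowD_eq _ (by rw [List.length_set]; exact hny), List.getElem_set_self (by rw [List.length_set]; exact hny)]
      by_cases hex : nx.toNat = x
      · subst hex
        rw [colD_eq _ (by rw [List.length_set]; exact hnx), List.getElem_set_self (by rw [List.length_set]; exact hnx),
            if_pos ?_]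
        refine ⟨by omega, by omega, hny, ?_, ?_⟩
        · rw [rowD_eq _ hny]; omega
        · rw [rowD_eq _ hny, colD_eq _ hnx]
          exact h5
      · by_cases hx : x < g[ny.toNat].length
        · rw [colD_eq _ (by rw [List.length_set]; omega), List.getElem_set_ne hex _,
              if_neg ?_, rowD_eq _ hny, colD_eq _ hx]
          rintro ⟨e1, e2, _⟩
          exact hex (by omega)
        · rw [List.getD_eq_getElem?_getD, List.getElem?_eq_none (by rw [List.length_set]; omega),
              if_neg ?_]
          · rw [rowD_eq _ hny, List.getD_eq_getElem?_getD,
                List.getElem?_eq_none (by omega)]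
          · rintro ⟨e1, e2, _, hxx, _⟩
            rw [rowD_eq _ hny] at hxx
            omega
    · have hside : (g.set ny.toNat (g[ny.toNat].set nx.toNat 'S')).getD y [] = g.getD y [] := by
        by_cases hy : y < g.length
        · rw [rowD_eq _ (by rw [List.length_set]; exact hy), rowD_eq _ hy,
              List.getElem_set_ne hey]
        · rw [List.getD_eq_getElem?_getD, List.getElem?_eq_none (by rw [List.length_set]; omega),
              List.getD_eq_getElem?_getD (l := g), List.getElem?_eq_none (by omega)]
      rw [hside, if_neg ?_]
      rintro ⟨e1, _⟩
      exact hey (by omega)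
  · next h =>
    have hno : ¬(ny = (y : Int) ∧ nx = (x : Int) ∧ y < g.length ∧
        x < (g.getD y []).length ∧ (g.getD y []).getD x ' ' ≠ '#') := by
      rintro ⟨e1, e2, hy, hx, hne⟩
      apply h
      subst e1 e2
      refine ⟨by omega, by rw [PySem.List.len_eq]; exact_mod_cast hy, by omega, ?_, ?_⟩
      · rw [PySem.List.len_eq, PySem.List.pyGetD_natCast]
        exact_mod_cast hx
      · rwa [PySem.List.pyGetD_natCast, PySem.List.pyGetD_natCast]
    rw [if_neg hno]

theorem len_foldPush (ts : List (Int × Int)) (g : List (List Char)) :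
    (ts.foldl (fun g q => bPush g q.1 q.2) g).length = g.length := by
  induction ts generalizing g with
  | nil => rfl
  | cons t ts ih => rw [List.foldl_cons, ih, len_bPush]

theorem getD_foldPush (ts : List (Int × Int)) (g : List (List Char)) (y : Nat) :
    ((ts.foldl (fun g q => bPush g q.1 q.2) g).getD y []).length = (g.getD y []).length := by
  induction ts generalizing g with
  | nil => rfl
  | cons t ts ih => rw [List.foldl_cons, ih, getD_bPush]

theorem celG_foldPush (ts : List (Int × Int)) (g : List (List Char)) (y x : Nat) :
    celG (ts.foldl (fun g q => bPush g q.1 q.2) g) y x =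
      if (((y : Int), (x : Int)) ∈ ts) ∧ y < g.length ∧ x < (g.getD y []).length ∧
          celG g y x ≠ '#'
      then 'S' else celG g y x := by
  induction ts generalizing g with
  | nil => simp
  | cons t ts ih =>
    rw [List.foldl_cons, ih, len_bPush, getD_bPush, celG_bPush]
    simp only [List.mem_cons]
    by_cases hC : celG g y x = '#'
    · have hinner : (if t.1 = (y:Int) ∧ t.2 = (x:Int) ∧ y < g.length ∧
          x < (g.getD y []).length ∧ celG g y x ≠ '#' then 'S' else celG g y x) = celG g y x :=
        if_neg (by tauto)
      rw [hinner, if_neg (by tauto), if_neg (by tauto)]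
    · by_cases hY : y < g.length
      · by_cases hX : x < (g.getD y []).length
        · by_cases hT : t.1 = (y:Int) ∧ t.2 = (x:Int)
          · have ht' : ((y:Int), (x:Int)) = t := by
              rw [Prod.ext_iff]; exact ⟨hT.1.symm, hT.2.symm⟩
            have hinner : (if t.1 = (y:Int) ∧ t.2 = (x:Int) ∧ y < g.length ∧
                x < (g.getD y []).length ∧ celG g y x ≠ '#' then 'S' else celG g y x) = 'S' :=
              if_pos ⟨hT.1, hT.2, hY, hX, hC⟩
            rw [hinner, ite_self, if_pos ⟨Or.inl ht', hY, hX, hC⟩]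
          · have hinner : (if t.1 = (y:Int) ∧ t.2 = (x:Int) ∧ y < g.length ∧
                x < (g.getD y []).length ∧ celG g y x ≠ '#' then 'S' else celG g y x) =
                celG g y x := if_neg (by tauto)
            rw [hinner]
            by_cases hA : (((y:Int), (x:Int)) ∈ ts)
            · rw [if_pos ⟨hA, hY, hX, hC⟩, if_pos ⟨Or.inr hA, hY, hX, hC⟩]
            · rw [if_neg (by tauto), if_neg ?_]
              rintro ⟨he | hA', _⟩
              · exact hT ⟨by rw [← he], by rw [← he]⟩
              · exact hA hA'
        · have hinner : (if t.1 = (y:Int) ∧ t.2 = (x:Int) ∧ y < g.length ∧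
              x < (g.getD y []).length ∧ celG g y x ≠ '#' then 'S' else celG g y x) =
              celG g y x := if_neg (by tauto)
          rw [hinner, if_neg (by tauto), if_neg (by tauto)]
      · have hinner : (if t.1 = (y:Int) ∧ t.2 = (x:Int) ∧ y < g.length ∧
            x < (g.getD y []).length ∧ celG g y x ≠ '#' then 'S' else celG g y x) =
            celG g y x := if_neg (by tauto)
        rw [hinner, if_neg (by tauto), if_neg (by tauto)]

def nbTargets (p : Int × Int) : List (Int × Int) :=
  [(p.1 - 1, p.2), (p.1 + 1, p.2), (p.1, p.2 - 1), (p.1, p.2 + 1)]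

theorem len_bStep (g : List (List Char)) (p : Int × Int) : (bStep g p).length = g.length :=
  len_foldPush _ g

theorem getD_bStep (g : List (List Char)) (p : Int × Int) (y : Nat) :
    ((bStep g p).getD y []).length = (g.getD y []).length :=
  getD_foldPush _ g y

theorem celG_bStep (g : List (List Char)) (p : Int × Int) (y x : Nat) :
    celG (bStep g p) y x =
      if (((y : Int), (x : Int)) ∈ nbTargets p) ∧ y < g.length ∧ x < (g.getD y []).length ∧
          celG g y x ≠ '#'
      then 'S' else celG g y x :=
  celG_foldPush _ g y x

theorem len_foldStep (l : List (Int × Int)) (g : List (List Char)) :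
    (l.foldl bStep g).length = g.length := by
  induction l generalizing g with
  | nil => rfl
  | cons t l ih => rw [List.foldl_cons, ih, len_bStep]

theorem getD_foldStep (l : List (Int × Int)) (g : List (List Char)) (y : Nat) :
    ((l.foldl bStep g).getD y []).length = (g.getD y []).length := by
  induction l generalizing g with
  | nil => rfl
  | cons t l ih => rw [List.foldl_cons, ih, getD_bStep]

theorem celG_foldStep (l : List (Int × Int)) (g : List (List Char)) (y x : Nat) :
    celG (l.foldl bStep g) y x =
      if (∃ p ∈ l, (((y : Int), (x : Int)) ∈ nbTargets p)) ∧ y < g.length ∧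
          x < (g.getD y []).length ∧ celG g y x ≠ '#'
      then 'S' else celG g y x := by
  induction l generalizing g with
  | nil => simp
  | cons t l ih =>
    rw [List.foldl_cons, ih, len_bStep, getD_bStep, celG_bStep]
    simp only [List.exists_mem_cons_iff]
    by_cases hC : celG g y x = '#'
    · have hinner : (if (((y:Int), (x:Int)) ∈ nbTargets t) ∧ y < g.length ∧
          x < (g.getD y []).length ∧ celG g y x ≠ '#' then 'S' else celG g y x) = celG g y x :=
        if_neg (by tauto)
      rw [hinner, if_neg (by tauto), if_neg (by tauto)]
    · by_cases hY : y < g.length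
      · by_cases hX : x < (g.getD y []).length
        · by_cases hT : ((y:Int), (x:Int)) ∈ nbTargets t
          · have hinner : (if (((y:Int), (x:Int)) ∈ nbTargets t) ∧ y < g.length ∧
                x < (g.getD y []).length ∧ celG g y x ≠ '#' then 'S' else celG g y x) = 'S' :=
              if_pos ⟨hT, hY, hX, hC⟩
            rw [hinner, ite_self, if_pos ⟨Or.inl hT, hY, hX, hC⟩]
          · have hinner : (if (((y:Int), (x:Int)) ∈ nbTargets t) ∧ y < g.length ∧
                x < (g.getD y []).length ∧ celG g y x ≠ '#' then 'S' else celG g y x) =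
                celG g y x := if_neg (by tauto)
            rw [hinner]
            by_cases hA : (∃ p ∈ l, (((y:Int), (x:Int)) ∈ nbTargets p))
            · rw [if_pos ⟨hA, hY, hX, hC⟩, if_pos ⟨Or.inr hA, hY, hX, hC⟩]
            · rw [if_neg (fun h => hA h.1), if_neg ?_]
              rintro ⟨hor, _⟩
              rcases hor with h | h
              · exact hT h
              · exact hA h
        · have hinner : (if (((y:Int), (x:Int)) ∈ nbTargets t) ∧ y < g.length ∧
              x < (g.getD y []).length ∧ celG g y x ≠ '#' then 'S' else celG g y x) =
              celG g y x := if_neg (by tauto)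
          rw [hinner, if_neg (by tauto), if_neg (by tauto)]
      · have hinner : (if (((y:Int), (x:Int)) ∈ nbTargets t) ∧ y < g.length ∧
            x < (g.getD y []).length ∧ celG g y x ≠ '#' then 'S' else celG g y x) =
            celG g y x := if_neg (by tauto)
        rw [hinner, if_neg (by tauto), if_neg (by tauto)]

theorem len_bBase (garden : List String) : (bBase garden).length = garden.length := by
  simp [bBase]

theorem getD_bBase (garden : List String) (y : Nat) :
    (bBase garden).getD y [] =
      ((garden.getD y "").toList).map (fun c => if c = '#' then '#' else '.') := by
  by_cases hy : y < garden.length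
  · rw [rowD_eq _ (by rw [len_bBase]; exact hy), strD_eq _ hy]
    simp [bBase]
  · rw [List.getD_eq_getElem?_getD, List.getElem?_eq_none (by rw [len_bBase]; omega),
        show garden.getD y "" = "" from List.getD_eq_default _ _ (by omega)]
    rfl

theorem mem_bFrontier (garden : List String) (p : Int × Int) :
    p ∈ bFrontier garden ↔ ∃ y x : Nat, y < garden.length ∧
      x < (garden.getD y "").toList.length ∧ celS garden y x = 'S' ∧ p = ((y : Int), (x : Int)) := by
  unfold bFrontier
  rw [List.mem_flatMap]
  constructor
  · rintro ⟨a, ha, hp⟩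
    obtain ⟨k, hk, rfl⟩ := (PySem.List.mem_enumerate_iff _ _ _).1 ha
    rw [List.mem_filterMap] at hp
    obtain ⟨q, hq, hsome⟩ := hp
    obtain ⟨j, hj, rfl⟩ := (PySem.List.mem_enumerate_iff _ _ _).1 hq
    split at hsome
    · next hS =>
      refine ⟨k, j, hk, ?_, ?_, ?_⟩
      · rwa [strD_eq _ hk]
      · rw [celS, strD_eq _ hk, colD_eq _ hj]; exact hS
      · simpa using hsome.symm
    · exact absurd hsome (by simp)
  · rintro ⟨y, x, hy, hx, hS, rfl⟩
    refine ⟨((y : Int), garden[y]), ?_, ?_⟩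
    · exact (PySem.List.mem_enumerate_iff _ _ _).2 ⟨y, hy, by simp⟩
    · rw [List.mem_filterMap]
      rw [strD_eq _ hy] at hx
      refine ⟨((x : Int), garden[y].toList[x]), ?_, ?_⟩
      · exact (PySem.List.mem_enumerate_iff _ _ _).2 ⟨x, hx, by simp⟩
      · rw [celS, strD_eq _ hy, colD_eq _ hx] at hS
        rw [if_pos hS]

theorem exists_nb_iff (garden : List String) (y x : Nat) :
    (∃ p ∈ bFrontier garden, (((y : Int), (x : Int)) ∈ nbTargets p)) ↔
      ((0 < y ∧ celS garden (y - 1) x = 'S') ∨ celS garden (y + 1) x = 'S' ∨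
        (0 < x ∧ celS garden y (x - 1) = 'S') ∨ celS garden y (x + 1) = 'S') := by
  constructor
  · rintro ⟨p, hp, hmem⟩
    obtain ⟨sy, sx, hsy, hsx, hS, rfl⟩ := (mem_bFrontier garden p).1 hp
    simp only [nbTargets, List.mem_cons, List.not_mem_nil, or_false, Prod.ext_iff] at hmem
    rcases hmem with ⟨e1, e2⟩ | ⟨e1, e2⟩ | ⟨e1, e2⟩ | ⟨e1, e2⟩
    · have h1 : sy = y + 1 := by omega
      have h2 : sx = x := by omega
      subst h1; subst h2
      exact Or.inr (Or.inl hS)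
    · have h0 : 0 < y := by omega
      have h1 : sy = y - 1 := by omega
      have h2 : sx = x := by omega
      subst h1; subst h2
      exact Or.inl ⟨h0, hS⟩
    · have h1 : sy = y := by omega
      have h2 : sx = x + 1 := by omega
      subst h1; subst h2
      exact Or.inr (Or.inr (Or.inr hS))
    · have h0 : 0 < x := by omega
      have h1 : sy = y := by omega
      have h2 : sx = x - 1 := by omega
      subst h1; subst h2
      exact Or.inr (Or.inr (Or.inl ⟨h0, hS⟩))
  · have hS' : ('S' : Char) ≠ ' ' := by decide
    rintro (⟨h0, hS⟩ | hS | ⟨h0, hS⟩ | hS)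
    · obtain ⟨hb1, hb2⟩ := bounds_of_celS hS' hS
      refine ⟨((y - 1 : Nat), (x : Nat)), (mem_bFrontier garden _).2
        ⟨y - 1, x, hb1, hb2, hS, rfl⟩, ?_⟩
      simp [nbTargets, Prod.ext_iff]
      omega
    · obtain ⟨hb1, hb2⟩ := bounds_of_celS hS' hS
      refine ⟨((y + 1 : Nat), (x : Nat)), (mem_bFrontier garden _).2
        ⟨y + 1, x, hb1, hb2, hS, rfl⟩, ?_⟩
      simp [nbTargets, Prod.ext_iff]
    · obtain ⟨hb1, hb2⟩ := bounds_of_celS hS' hS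
      refine ⟨((y : Nat), (x - 1 : Nat)), (mem_bFrontier garden _).2
        ⟨y, x - 1, hb1, hb2, hS, rfl⟩, ?_⟩
      simp [nbTargets, Prod.ext_iff]
      omega
    · obtain ⟨hb1, hb2⟩ := bounds_of_celS hS' hS
      refine ⟨((y : Nat), (x + 1 : Nat)), (mem_bFrontier garden _).2
        ⟨y, x + 1, hb1, hb2, hS, rfl⟩, ?_⟩
      simp [nbTargets, Prod.ext_iff]

theorem B_eq (garden : List String) :
    next_garden_state_alt garden =
      ((List.range garden.length).map (fun y =>
        (List.range (garden.getD y "").toList.length).map (fun x => specC garden y x))).map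
        String.ofList := by
  unfold next_garden_state_alt
  rw [List.map_map]
  apply List.ext_getElem
  · rw [List.length_map, len_foldStep, len_bBase, List.length_map, List.length_range]
  intro y hy1 hy2
  rw [List.length_map, len_foldStep, len_bBase] at hy1
  simp only [List.getElem_map, List.getElem_range, Function.comp_apply]
  congr 1
  apply List.ext_getElem
  · rw [← rowD_eq _ (by rw [len_foldStep, len_bBase]; exact hy1), getD_foldStep, getD_bBase,
      List.length_map, List.length_map, List.length_range]
  intro x hx1 hx2
  rw [List.length_map, List.length_range] at hx2
  have hx1' : x < (garden.getD y "").toList.length := hx2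
  rw [List.getElem_map, List.getElem_range]
  rw [← colD_eq _ hx1, ← rowD_eq _ (by rw [len_foldStep, len_bBase]; exact hy1)]
  show celG ((bFrontier garden).foldl bStep (bBase garden)) y x = specC garden y x
  rw [celG_foldStep]
  have hYb : y < (bBase garden).length := by rw [len_bBase]; exact hy1
  have hXb : x < ((bBase garden).getD y []).length := by
    rw [getD_bBase, List.length_map]; exact hx1'
  have hcel : celG (bBase garden) y x =
      (if celS garden y x = '#' then '#' else '.') := by
    rw [celG, getD_bBase, colD_eq _ (by rw [List.length_map]; exact hx1'),
      List.getElem_map, celS, colD_eq _ hx1']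
  unfold specC
  by_cases hH : celS garden y x = '#'
  · rw [if_pos hH]
    rw [if_neg ?_]
    · rw [hcel, if_pos hH]
    rintro ⟨_, _, _, hne⟩
    rw [hcel, if_pos hH] at hne
    exact hne rfl
  · rw [if_neg hH]
    by_cases hE : (∃ p ∈ bFrontier garden, (((y : Int), (x : Int)) ∈ nbTargets p))
    · rw [if_pos ⟨hE, hYb, hXb, by rw [hcel, if_neg hH]; decide⟩,
        if_pos ((exists_nb_iff garden y x).1 hE)]
    · rw [if_neg (fun h => hE h.1), if_neg (fun h => hE ((exists_nb_iff garden y x).2 h)),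
        hcel, if_neg hH]

-- ===== VERDICT (by name: the statement is the Claim_ definition above) =====
theorem next_garden_state_spec : Claim_equal_next_garden_state := by
  intro garden _ _
  unfold Spec_next_garden_state
  rw [A_eq, B_eq]
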